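-- pv_equiv track=rewrite | github.com/LC-Linkous/cryptography_examples | src/grid/ADFGVX/decrypt.py | guess_column_arrangement
-- ===== SOURCE A (Python) =====
-- def guess_column_arrangement(encrypted_text, key_length):
--     # we can look at the length of the text to guess at some initial
--     # column values. It has to be square, so there's a relation between
--     # the encrypted text and key. (But it's not just this easy)
--
--     # Simple approach: divide as evenly as possible
--     total_length = len(encrypted_text)
--     base_length = total_length // key_length
--     extra_chars = total_length % key_length
--
--     columns = []
--     start = 0
--
--     for i in range(key_length):
--         # Some columns might be one character longer
--         col_length = base_length + (1 if i < extra_chars else 0)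
--         columns.append(encrypted_text[start:start + col_length])
--         start += col_length
--
--     return columns
-- ===== SOURCE B (Python) =====
-- def guess_column_arrangement(encrypted_text, key_length):
--     # Head-peeling: the first remaining column always gets ceil(len/k)
--     # characters (the split is as even as possible with longer columns first),
--     # then continue on the remaining suffix with k-1 columns. No base/extra
--     # bookkeeping and no running start index: the division is redone on the
--     # shrinking text each step.
--     columns = []
--     remaining = encrypted_text
--     k = key_length
--     while k > 0:
--         col_length = -(-len(remaining) // k)  # ceiling division
--         columns.append(remaining[:col_length])
--         remaining = remaining[col_length:]
--         k -= 1
--     return columns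
-- ===== Notes on version B (the rewrite author's own statement) =====
-- stated objective: alternative
-- what changed: Replaced A's loop over precomputed base_length/extra_chars with a running start index by head-peeling: repeatedly strip a prefix of length ceil(len/remaining_k) off the shrinking text, recomputing the division each step; no carried base/extra or start state.
import Mathlib
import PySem

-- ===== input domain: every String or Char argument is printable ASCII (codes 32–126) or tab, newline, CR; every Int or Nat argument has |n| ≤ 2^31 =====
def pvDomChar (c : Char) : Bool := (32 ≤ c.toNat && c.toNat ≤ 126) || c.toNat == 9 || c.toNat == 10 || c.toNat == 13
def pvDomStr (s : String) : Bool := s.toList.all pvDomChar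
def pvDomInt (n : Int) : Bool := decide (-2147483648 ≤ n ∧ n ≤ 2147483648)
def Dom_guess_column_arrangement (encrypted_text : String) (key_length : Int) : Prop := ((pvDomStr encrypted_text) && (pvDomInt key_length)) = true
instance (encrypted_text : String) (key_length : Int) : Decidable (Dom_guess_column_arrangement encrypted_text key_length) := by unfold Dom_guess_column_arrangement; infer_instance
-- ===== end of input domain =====

-- B replaces A's base/extra loop with a running start index by head-peeling:
-- strip a prefix of length ceil(len/k) off the shrinking text, k times
-- (alternative decomposition, same result).

-- ===== PORT A =====
def guess_column_arrangement (encrypted_text : String) (key_length : Int) : List String :=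
  let cs := encrypted_text.toList
  let total_length : Int := cs.length
  let base_length := PySem.Int.floordiv total_length key_length
  let extra_chars := PySem.Int.mod total_length key_length
  ((PySem.List.pyRange 0 key_length 1).foldl
    (fun (st : List String × Int) i =>
      let col_length := base_length + (if i < extra_chars then 1 else 0)
      (st.1 ++ [String.ofList (PySem.List.slice cs (some st.2) (some (st.2 + col_length)))],
       st.2 + col_length))
    ([], 0)).1

-- ===== PORT B =====
-- Worker for B's peel loop: head column = ceil(len/k) chars of the remaining
-- text, then continue on the suffix with k-1. The `while k > 0` loop is encoded
-- structurally on k.toNat (0 case ↔ k ≤ 0, where the loop body never runs).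
def gcaAltGoNat : List Char → Nat → List String
  | _, 0 => []
  | cs, m + 1 =>
    let col_length := -(PySem.Int.floordiv (-(cs.length : Int)) ((m + 1 : Nat) : Int))
    String.ofList (PySem.List.slice cs none (some col_length)) ::
      gcaAltGoNat (PySem.List.slice cs (some col_length) none) m

def guess_column_arrangement_alt (encrypted_text : String) (key_length : Int) : List String :=
  gcaAltGoNat encrypted_text.toList key_length.toNat

-- ===== PRECONDITION & SPEC =====
-- Pre_ excludes exactly key_length = 0, where Python A raises ZeroDivisionError.
def Pre_guess_column_arrangement (_encrypted_text : String) (key_length : Int) : Prop := key_length ≠ 0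
instance (encrypted_text : String) (key_length : Int) : Decidable (Pre_guess_column_arrangement encrypted_text key_length) := by unfold Pre_guess_column_arrangement; infer_instance
def pvWitness_guess_column_arrangement : String × Int := ("HELLOWORLD", 3)

def Spec_guess_column_arrangement (encrypted_text : String) (key_length : Int) (out : List String) : Prop := out = guess_column_arrangement_alt encrypted_text key_length
instance (encrypted_text : String) (key_length : Int) (out : List String) : Decidable (Spec_guess_column_arrangement encrypted_text key_length out) := by unfold Spec_guess_column_arrangement; infer_instance

-- ===== CLAIM =====
def Claim_equal_guess_column_arrangement : Prop := ∀ (encrypted_text : String) (key_length : Int), Dom_guess_column_arrangement encrypted_text key_length → Pre_guess_column_arrangement encrypted_text key_length → Spec_guess_column_arrangement encrypted_text key_length (guess_column_arrangement encrypted_text key_length)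

-- ===== LEMMAS AND PROOFS =====

-- A's loop starting at start = base*a + min a extra yields the closed-form map.
theorem gca_loop_inv (cs : List Char) (base extra : Int) (b : Int) :
    ∀ a : Int, ∀ acc : List String,
    ((PySem.List.pyRange a b 1).foldl
      (fun (st : List String × Int) i =>
        let col_length := base + (if i < extra then 1 else 0)
        (st.1 ++ [String.ofList (PySem.List.slice cs (some st.2) (some (st.2 + col_length)))],
         st.2 + col_length))
      (acc, base * a + min a extra)).1
    = acc ++ (PySem.List.pyRange a b 1).map (fun i =>
        String.ofList (PySem.List.slice cs
          (some (base * i + min i extra))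
          (some (base * (i + 1) + min (i + 1) extra)))) := by
  intro a
  by_cases h : b ≤ a
  · intro acc
    rw [PySem.List.pyRange_one_eq_nil h]
    simp
  · have hlt : a < b := lt_of_not_ge h
    have hdec : (b - (a + 1)).toNat < (b - a).toNat := by omega
    intro acc
    rw [PySem.List.pyRange_one_cons hlt]
    simp only [List.foldl_cons, List.map_cons]
    have hstart : base * a + min a extra + (base + (if a < extra then 1 else 0))
        = base * (a + 1) + min (a + 1) extra := by
      have hmin : min (a + 1) extra = min a extra + (if a < extra then 1 else 0) := by
        split <;> omega
      rw [hmin]; ring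
    have := gca_loop_inv cs base extra b (a + 1)
      (acc ++ [String.ofList (PySem.List.slice cs (some (base * a + min a extra))
        (some (base * a + min a extra + (base + (if a < extra then 1 else 0)))))])
    rw [hstart] at this
    simp only [this, hstart, List.append_assoc, List.singleton_append]
termination_by a => (b - a).toNat

-- floor-division uniqueness from the bracket characterisation
theorem fd_unique (n k q r : Int) (hk : 0 < k) (h : n = q * k + r)
    (h0 : 0 ≤ r) (h1 : r < k) :
    PySem.Int.floordiv n k = q ∧ PySem.Int.mod n k = r := by
  have hq : PySem.Int.floordiv n k = q := by
    rw [PySem.Int.floordiv_eq_iff_of_pos hk]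
    constructor <;> nlinarith
  refine ⟨hq, ?_⟩
  have hm := PySem.Int.floordiv_mul_add_mod n k
  rw [hq] at hm
  linarith

-- ceiling division in terms of A's base/extra
theorem ceil_char (n k : Int) (hk : 0 < k) :
    -(PySem.Int.floordiv (-n) k)
      = PySem.Int.floordiv n k + (if 0 < PySem.Int.mod n k then 1 else 0) := by
  have hm := PySem.Int.floordiv_mul_add_mod n k
  have h0 := PySem.Int.mod_nonneg n hk
  have h1 := PySem.Int.mod_lt n hk
  rw [PySem.Int.neg_floordiv_neg_eq_iff_of_pos hk]
  split_ifs with h <;> constructor <;> nlinarith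

-- base/extra of the remaining text after peeling the head column
theorem step_arith (n k : Int) (hk : 1 < k) :
    PySem.Int.floordiv
        (n - (PySem.Int.floordiv n k + (if 0 < PySem.Int.mod n k then 1 else 0))) (k - 1)
      = PySem.Int.floordiv n k ∧
    PySem.Int.mod
        (n - (PySem.Int.floordiv n k + (if 0 < PySem.Int.mod n k then 1 else 0))) (k - 1)
      = PySem.Int.mod n k - (if 0 < PySem.Int.mod n k then 1 else 0) := by
  have hkpos : (0:Int) < k := by omega
  have hm := PySem.Int.floordiv_mul_add_mod n k
  have h0 := PySem.Int.mod_nonneg n hkpos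
  have h1 := PySem.Int.mod_lt n hkpos
  apply fd_unique _ _ _ _ (by omega)
  · split_ifs <;> nlinarith
  · split_ifs <;> omega
  · split_ifs <;> omega

theorem pyRange_one_shift (a b : Int) :
    PySem.List.pyRange (a + 1) (b + 1) 1 = (PySem.List.pyRange a b 1).map (· + 1) := by
  rw [PySem.List.pyRange_one, PySem.List.pyRange_one, List.map_map]
  have h : b + 1 - (a + 1) = b - a := by ring
  rw [h]
  apply List.map_congr_left
  intro x _
  simp [Function.comp]
  ring

theorem slice_drop_shift (cs : List Char) (c a b : Int) (hc : 0 ≤ c) (ha : 0 ≤ a) (hb : 0 ≤ b) :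
    PySem.List.slice (cs.drop c.toNat) (some a) (some b)
      = PySem.List.slice cs (some (c + a)) (some (c + b)) := by
  rw [PySem.List.slice_toNat _ ha hb, PySem.List.slice_toNat _ (by omega) (by omega),
      List.drop_drop]
  congr 1
  · omega
  · congr 1; omega

-- column start/end bounds shift by the head column length
theorem shift_bound (B E i : Int) (hE0 : 0 ≤ E) (hi : 0 ≤ i) :
    (B + (if 0 < E then 1 else 0)) + (B * i + min i (E - (if 0 < E then 1 else 0)))
      = B * (i + 1) + min (i + 1) E := by
  have hr : B * (i + 1) = B * i + B := by ring
  rw [hr]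
  split_ifs with h
  · have h1 : min i (E - 1) + 1 = min (i + 1) E := by omega
    linarith
  · have he : E = 0 := by omega
    subst he
    have h4 : (0 : Int) - 0 = 0 := by ring
    rw [h4]
    have h2 : min i 0 = 0 := by omega
    have h3 : min (i + 1) 0 = 0 := by omega
    linarith

-- B's recursion equals the closed-form map
theorem alt_go_eq (k : Int) (cs : List Char) (hk : 0 < k) :
    gcaAltGoNat cs k.toNat = (PySem.List.pyRange 0 k 1).map (fun i =>
      String.ofList (PySem.List.slice cs
        (some (PySem.Int.floordiv (cs.length : Int) k * i + min i (PySem.Int.mod (cs.length : Int) k)))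
        (some (PySem.Int.floordiv (cs.length : Int) k * (i + 1) + min (i + 1) (PySem.Int.mod (cs.length : Int) k))))) := by
  have hdec : (k - 1).toNat < k.toNat := by omega
  set n : Int := (cs.length : Int) with hn
  have hn0 : 0 ≤ n := by simp [hn]
  set B := PySem.Int.floordiv n k with hB
  set E := PySem.Int.mod n k with hE
  have hm := PySem.Int.floordiv_mul_add_mod n k
  have hE0 : 0 ≤ E := PySem.Int.mod_nonneg n hk
  have hE1 : E < k := PySem.Int.mod_lt n hk
  have hB0 : 0 ≤ B := by
    rw [hB]
    have := (PySem.Int.le_floordiv_iff_mul_le (a := n) (b := k) (q := 0) hk)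
    exact this.mpr (by omega)
  have hceil : -(PySem.Int.floordiv (-n) k) = B + (if 0 < E then 1 else 0) := by
    rw [ceil_char n k hk, ← hB, ← hE]
  set col := B + (if 0 < E then 1 else 0) with hcol
  have hcol0 : 0 ≤ col := by rw [hcol]; split_ifs <;> omega
  have hcoln : col ≤ n := by
    rw [hcol]
    split_ifs with h
    · nlinarith
    · nlinarith
  obtain ⟨m, hkm⟩ : ∃ m : Nat, k.toNat = m + 1 := ⟨k.toNat - 1, by omega⟩
  rw [hkm]
  show (let col_length := -(PySem.Int.floordiv (-(cs.length : Int)) ((m + 1 : Nat) : Int))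
    String.ofList (PySem.List.slice cs none (some col_length)) ::
      gcaAltGoNat (PySem.List.slice cs (some col_length) none) m) = _
  rw [show ((m + 1 : Nat) : Int) = k by omega]
  simp only [← hn, hceil]
  rw [PySem.List.pyRange_one_cons hk, List.map_cons]
  have hcs' : PySem.List.slice cs (some col) none = cs.drop col.toNat :=
    PySem.List.slice_from cs hcol0
  congr 1
  · -- head column
    have h0 : B * 0 + min 0 E = 0 := by omega
    have h1 : B * (0 + 1) + min (0 + 1) E = col := by
      rw [hcol]
      have : min (0 + 1 : Int) E = (if 0 < E then 1 else 0) := by split_ifs <;> omega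
      rw [this]; ring
    rw [h0, h1]
    simp
  · -- tail columns
    by_cases hk1 : k ≤ 1
    · have hm0 : m = 0 := by omega
      subst hm0
      rw [PySem.List.pyRange_one_eq_nil (by omega)]
      rfl
    · have hk2 : 1 < k := by omega
      have hlen' : ((cs.drop col.toNat).length : Int) = n - col := by
        have : col.toNat ≤ cs.length := by omega
        simp [List.length_drop]
        omega
      have hIH := alt_go_eq (k - 1) (cs.drop col.toNat) (by omega)
      rw [show (k - 1).toNat = m by omega] at hIH
      rw [hcs', hIH]
      have hstep := step_arith n k hk2
      rw [← hB, ← hE, ← hcol] at hstep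
      rw [hlen', hstep.1, hstep.2]
      have hshift := pyRange_one_shift 0 (k - 1)
      norm_num at hshift
      simp only [zero_add]
      rw [hshift, List.map_map]
      apply List.map_congr_left
      intro i hi
      have hi0 : 0 ≤ i := ((PySem.List.mem_pyRange_one).mp hi).1
      simp only [Function.comp]
      have hE'0 : 0 ≤ E - (if 0 < E then 1 else 0) := by split_ifs <;> omega
      have ha0 : 0 ≤ B * i + min i (E - (if 0 < E then 1 else 0)) := by
        have : 0 ≤ B * i := mul_nonneg hB0 hi0
        omega
      have hb0 : 0 ≤ B * (i + 1) + min (i + 1) (E - (if 0 < E then 1 else 0)) := by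
        have : 0 ≤ B * (i + 1) := mul_nonneg hB0 (by omega)
        omega
      rw [slice_drop_shift cs col _ _ hcol0 ha0 hb0]
      rw [shift_bound B E i hE0 hi0]
      have h2 := shift_bound B E (i + 1) hE0 (by omega)
      rw [h2]
termination_by k.toNat

-- ===== VERDICT =====
theorem guess_column_arrangement_spec : Claim_equal_guess_column_arrangement := by
  intro s k _ hk
  unfold Spec_guess_column_arrangement guess_column_arrangement guess_column_arrangement_alt
  by_cases hkpos : 0 < k
  · rw [alt_go_eq k s.toList hkpos]
    have hext : 0 ≤ PySem.Int.mod (s.toList.length : Int) k := PySem.Int.mod_nonneg _ hkpos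
    have h0 : PySem.Int.floordiv (s.toList.length : Int) k * 0
        + min 0 (PySem.Int.mod (s.toList.length : Int) k) = 0 := by omega
    have := gca_loop_inv s.toList (PySem.Int.floordiv (s.toList.length : Int) k)
      (PySem.Int.mod (s.toList.length : Int) k) k 0 []
    rw [h0] at this
    simpa using this
  · have hk0 : k ≤ 0 := le_of_not_gt hkpos
    rw [PySem.List.pyRange_one_eq_nil hk0]
    rw [show k.toNat = 0 by omega]
    simp [gcaAltGoNat]
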